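-- pv_equiv track=rewrite | github.com/gimquokka/problem-solving | AejiJeon/ThisIsCT/dfsbfsProblem/괄호변환/18.py | solution
-- ===== SOURCE A (Python) =====
-- def check_balanced(s):
--     count = 0
--     for c in s:
--         if c == '(':
--             count += 1
--         elif c == ')':
--             count -= 1
--     if count == 0:
--         return True
--     else:
--         return False
--
-- def check_right(s):
--     count = 0
--     for c in s:
--         if c == '(':
--             count += 1
--         elif c == ')':
--             count -= 1
--         if count < 0:
--             return False
--     if count == 0:
--         return True
--     else:
--         return False
--
-- def div_string(s):
--     u = ''
--     for c in s:
--         u += c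
--         if check_balanced(u):
--
--             v = s[len(u):]
--
--             break
--     return u, v
--
-- def flip(s):
--     ns = ''
--     for c in s:
--         if c == '(':
--             ns += ')'
--         else:
--             ns += '('
--     return ns
--
-- def solution(w):
--     if w == '':
--         return ''
--
--     u, v = div_string(w)
--
--     if check_right(u):
--         return  u + solution(v)
--
--     else:
--         u = u[1:-1]
--         return '('+solution(v) + ')' + flip(u)
-- ===== SOURCE B (Python) =====
-- def solution(w):
--     if w == '':
--         return ''
--     bal = 0
--     neg = False
--     for i, c in enumerate(w):
--         if c == '(':
--             bal += 1
--         elif c == ')':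
--             bal -= 1
--         if bal < 0:
--             neg = True
--         if bal == 0:
--             break
--     else:
--         raise ValueError("no non-empty balanced prefix")
--     u, v = w[:i + 1], w[i + 1:]
--     if not neg:
--         return u + solution(v)
--     return '(' + solution(v) + ')' + ''.join(')' if ch == '(' else '(' for ch in u[1:-1])
-- ===== Notes on version B (the rewrite author's own statement) =====
-- stated objective: alternative
-- what changed: B finds the first balanced split point and the went-negative check in one single pass with a running balance counter, instead of A's div_string re-scanning every prefix with check_balanced plus a separate check_right rescan of the chosen part.
import Mathlib
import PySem

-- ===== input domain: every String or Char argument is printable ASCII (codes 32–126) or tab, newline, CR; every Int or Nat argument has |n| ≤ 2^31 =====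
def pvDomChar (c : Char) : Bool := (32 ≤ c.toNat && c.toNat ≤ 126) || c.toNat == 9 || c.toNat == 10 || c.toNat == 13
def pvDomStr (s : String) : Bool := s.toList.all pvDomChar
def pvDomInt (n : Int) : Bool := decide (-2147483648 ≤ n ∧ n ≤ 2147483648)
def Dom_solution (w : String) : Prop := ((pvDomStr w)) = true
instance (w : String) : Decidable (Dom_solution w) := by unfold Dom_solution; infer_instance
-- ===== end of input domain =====

-- B replaces A's div_string (which rescans every prefix with check_balanced) and the separate
-- check_right rescan by ONE pass with a running balance counter (alternative structure).

-- ===== PORT A =====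

-- the `count` update shared by A's loops
def updA (count : Int) (c : Char) : Int :=
  if c = '(' then count + 1 else if c = ')' then count - 1 else count

-- check_balanced's loop
def cbGo (count : Int) : List Char → Int
  | [] => count
  | c :: cs => cbGo (updA count c) cs

def checkBalanced (s : List Char) : Bool :=
  if cbGo 0 s = 0 then true else false

-- check_right's loop (early return False on count < 0)
def crGo (count : Int) : List Char → Bool
  | [] => if count = 0 then true else false
  | c :: cs =>
    let count' := updA count c
    if count' < 0 then false else crGo count' cs

def checkRight (s : List Char) : Bool := crGo 0 s

-- div_string's loop: u grows one char at a time, re-testing check_balanced(u);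
-- on break, v = s[len(u):].  Falling off the loop leaves v unassigned in Python
-- (UnboundLocalError) — modelled as `none`.
def divGo (s : List Char) (u : List Char) : List Char → Option (List Char × List Char)
  | [] => none
  | c :: cs =>
    let u' := u ++ [c]
    if checkBalanced u' then some (u', PySem.List.slice s (some (u'.length : Int)) none)
    else divGo s u' cs

def divString (s : List Char) : Option (List Char × List Char) := divGo s [] s

-- flip's loop: ns += ')' / '('
def flipGo (ns : List Char) : List Char → List Char
  | [] => ns
  | c :: cs => flipGo (ns ++ [if c = '(' then ')' else '(']) cs

-- termination helper for solA (cited in decreasing_by)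
theorem divGo_len (rest : List Char) : ∀ (u u' v s : List Char),
    divGo s u rest = some (u', v) → s ≠ [] → v.length < s.length := by
  induction rest with
  | nil => intro u u' v s h; simp [divGo] at h
  | cons c cs ih =>
    intro u u' v s h hs
    simp only [divGo] at h
    split at h
    · rw [Option.some.injEq, Prod.mk.injEq] at h
      obtain ⟨rfl, rfl⟩ := h
      rw [PySem.List.slice_from_natCast]
      have : 0 < s.length := List.length_pos_iff.mpr hs
      simp only [List.length_drop, List.length_append, List.length_cons, List.length_nil]
      omega
    · exact ih _ _ _ _ h hs

def solA (s : List Char) : List Char :=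
  if h0 : s = [] then []
  else
    match h : divString s with
    | none => []   -- Python raises UnboundLocalError here; excluded by Pre_solution
    | some (u, v) =>
      if checkRight u then u ++ solA v
      else '(' :: (solA v ++ ')' :: flipGo [] (PySem.List.slice u (some 1) (some (-1))))
termination_by s.length
decreasing_by all_goals exact divGo_len s [] u v s h h0

def solution (w : String) : String := String.ofList (solA w.toList)

-- ===== PORT B =====

-- B's single loop: running balance, `neg` flag, break when balance hits 0;
-- returns some (number of chars consumed = i+1, neg), or none if the loop
-- completes without break (B's for-else raises ValueError there).
def goB (bal : Int) (neg : Bool) : List Char → Option (Nat × Bool)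
  | [] => none
  | c :: cs =>
    let bal' := if c = '(' then bal + 1 else if c = ')' then bal - 1 else bal
    let neg' := if bal' < 0 then true else neg
    if bal' = 0 then some (1, neg')
    else (goB bal' neg' cs).map (fun p => (p.1 + 1, p.2))

-- termination helper for solB (cited in decreasing_by)
theorem goB_pos (l : List Char) : ∀ (bal : Int) (neg : Bool) (p : Nat × Bool),
    goB bal neg l = some p → 1 ≤ p.1 := by
  induction l with
  | nil => intro bal neg p h; simp [goB] at h
  | cons c cs ih =>
    intro bal neg p h
    simp only [goB] at h
    by_cases hz : (if c = '(' then bal + 1 else if c = ')' then bal - 1 else bal) = 0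
    · rw [if_pos hz] at h; cases h; simp
    · rw [if_neg hz] at h
      obtain ⟨p', hp', rfl⟩ := Option.map_eq_some_iff.mp h
      simp

def solB (s : List Char) : List Char :=
  if h0 : s = [] then []
  else
    match h : goB 0 false s with
    | none => []   -- B's Python raises ValueError here; excluded by Pre_solution
    | some r =>
      let u := s.take r.1
      let v := s.drop r.1
      if r.2 = false then u ++ solB v
      else '(' :: (solB v ++ ')' ::
        (PySem.List.slice u (some 1) (some (-1))).map (fun ch => if ch = '(' then ')' else '('))
termination_by s.length
decreasing_by
  all_goals
    simp only [List.length_drop]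
    have h1 := goB_pos s 0 false r h
    have h2 : 0 < s.length := List.length_pos_iff.mpr h0
    omega

def solution_alt (w : String) : String := String.ofList (solB w.toList)

-- ===== PRECONDITION & SPEC =====
-- A raises UnboundLocalError (div_string's `v` stays unassigned) exactly when the counts of
-- opening and closing parens differ; Pre_ admits exactly the inputs where A returns.
-- (B raises ValueError on the same inputs.)
def Pre_solution (w : String) : Prop := w.toList.count '(' = w.toList.count ')'
instance (w : String) : Decidable (Pre_solution w) := by unfold Pre_solution; infer_instance

def pvWitness_solution : String := "(())()"

def Spec_solution (w : String) (out : String) : Prop := out = solution_alt w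
instance (w : String) (out : String) : Decidable (Spec_solution w out) := by unfold Spec_solution; infer_instance

-- ===== CLAIM (what is proved, stated in full; the proofs are below) =====
def Claim_equal_solution : Prop := ∀ (w : String), Dom_solution w → Pre_solution w → Spec_solution w (solution w)

-- ===== LEMMAS AND PROOFS =====

-- whether the running balance, started at b, ever goes negative along l
def hasNeg (b : Int) : List Char → Bool
  | [] => false
  | c :: cs => if updA b c < 0 then true else hasNeg (updA b c) cs

theorem cbGo_add (l : List Char) : ∀ b : Int, cbGo b l = b + cbGo 0 l := by
  induction l with
  | nil => intro b; simp [cbGo]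
  | cons c cs ih =>
    intro b
    simp only [cbGo]
    rw [ih (updA b c), ih (updA 0 c)]
    simp only [updA]
    split_ifs <;> omega

theorem cbGo_append (a b : List Char) : cbGo 0 (a ++ b) = cbGo 0 a + cbGo 0 b := by
  induction a generalizing b with
  | nil => simp [cbGo]
  | cons c cs ih =>
    simp only [List.cons_append, cbGo]
    rw [cbGo_add cs, cbGo_add (cs ++ b), ih]
    ring

theorem updA_add (b : Int) (c : Char) : updA b c = b + updA 0 c := by
  unfold updA; split_ifs <;> omega

theorem cbGo_counts (l : List Char) :
    cbGo 0 l = (l.count '(' : Int) - (l.count ')' : Int) := by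
  induction l with
  | nil => simp [cbGo]
  | cons c cs ih =>
    have h : cbGo 0 (c :: cs) = updA 0 c + cbGo 0 cs := by
      simp only [cbGo]; rw [cbGo_add]
    rw [h, ih]
    simp only [List.count_cons, updA]
    by_cases h1 : c = '('
    · simp [h1]; omega
    · by_cases h2 : c = ')'
      · simp [h2]; omega
      · simp [h1, h2]

theorem crGo_spec (l : List Char) : ∀ b : Int,
    crGo b l = (!hasNeg b l && decide (cbGo b l = 0)) := by
  induction l with
  | nil => intro b; by_cases hb : b = 0 <;> simp [crGo, hasNeg, cbGo, hb]
  | cons c cs ih =>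
    intro b
    simp only [crGo, hasNeg, cbGo]
    by_cases h : updA b c < 0
    · simp [h]
    · simp [h, ih (updA b c)] <;> rfl

theorem flipGo_map (l : List Char) : ∀ ns : List Char,
    flipGo ns l = ns ++ l.map (fun ch => if ch = '(' then ')' else '(') := by
  induction l with
  | nil => intro ns; simp [flipGo]
  | cons c cs ih => intro ns; simp [flipGo, ih]

-- The heart: on a prefix split s = u ++ rest with total balance 0, A's div_string loop
-- and B's single-pass loop find the same split point k, and B's neg flag records
-- exactly whether the balance dipped below zero inside the chosen u-part.
theorem bridge (rest : List Char) : ∀ (s u : List Char) (n : Bool),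
    s = u ++ rest → rest ≠ [] → cbGo 0 s = 0 →
    ∃ k : Nat,
      goB (cbGo 0 u) n rest = some (k, n || hasNeg (cbGo 0 u) (rest.take k)) ∧
      1 ≤ k ∧
      divGo s u rest = some (u ++ rest.take k, rest.drop k) ∧
      cbGo 0 (u ++ rest.take k) = 0 := by
  induction rest with
  | nil => intro s u n _ hne _; exact absurd rfl hne
  | cons c cs ih =>
    intro s u n hs _ htot
    have hupd : ∀ b : Int, (if c = '(' then b + 1 else if c = ')' then b - 1 else b) = updA b c := by
      intro b; simp [updA]
    have hb' : cbGo 0 (u ++ [c]) = updA (cbGo 0 u) c := by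
      rw [cbGo_append]
      show cbGo 0 u + updA 0 c = updA (cbGo 0 u) c
      rw [updA_add (cbGo 0 u) c]
    by_cases hz : updA (cbGo 0 u) c = 0
    · -- break at this char: k = 1
      refine ⟨1, ?_, le_refl 1, ?_, ?_⟩
      · show goB (cbGo 0 u) n (c :: cs) = some (1, n || hasNeg (cbGo 0 u) [c])
        simp [goB, hupd, hz, hasNeg]
      · show divGo s u (c :: cs) = some (u ++ [c], cs)
        have hcb : checkBalanced (u ++ [c]) = true := by
          simp [checkBalanced, hb', hz]
        simp only [divGo, hcb, if_true]
        rw [PySem.List.slice_from_natCast, hs,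
          show u ++ c :: cs = (u ++ [c]) ++ cs by simp, List.drop_left]
      · show cbGo 0 (u ++ [c]) = 0
        rw [hb']; exact hz
    · -- no break here: recurse on cs
      have hcs : cs ≠ [] := by
        intro hnil; subst hnil
        apply hz
        have hsu : s = u ++ [c] := by simpa using hs
        rw [← hb', ← hsu]; exact htot
      have hs' : s = (u ++ [c]) ++ cs := by simp [hs]
      obtain ⟨k, hgo, hk1, hdiv, hbal⟩ :=
        ih s (u ++ [c]) (if updA (cbGo 0 u) c < 0 then true else n) hs' hcs htot
      rw [hb'] at hgo
      refine ⟨k + 1, ?_, by omega, ?_, ?_⟩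
      · show goB (cbGo 0 u) n (c :: cs) = some (k + 1, n || hasNeg (cbGo 0 u) (c :: cs.take k))
        simp only [goB, hupd, if_neg hz]
        rw [hgo]
        simp only [hasNeg]
        by_cases hneg : updA (cbGo 0 u) c < 0 <;> simp [hneg]
      · show divGo s u (c :: cs) = some (u ++ c :: cs.take k, cs.drop k)
        have hcb : checkBalanced (u ++ [c]) = false := by
          simp [checkBalanced, hb', hz]
        simp only [divGo, hcb, Bool.false_eq_true, if_false]
        rw [hdiv]
        simp
      · show cbGo 0 (u ++ c :: cs.take k) = 0
        rw [show u ++ c :: cs.take k = (u ++ [c]) ++ cs.take k by simp]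
        exact hbal

theorem solA_some (s u v : List Char) (h0 : ¬ s = []) (h : divString s = some (u, v)) :
    solA s = if checkRight u then u ++ solA v
      else '(' :: (solA v ++ ')' :: flipGo [] (PySem.List.slice u (some 1) (some (-1)))) := by
  rw [solA, dif_neg h0]
  split
  · next heq => rw [h] at heq; cases heq
  · next u' v' heq =>
      rw [h] at heq
      cases heq
      rfl

theorem solB_some (s : List Char) (r : Nat × Bool) (h0 : ¬ s = [])
    (h : goB 0 false s = some r) :
    solB s = (if r.2 = false
      then s.take r.1 ++ solB (s.drop r.1)
      else '(' :: (solB (s.drop r.1) ++ ')' ::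
        (PySem.List.slice (s.take r.1) (some 1) (some (-1))).map
          (fun ch => if ch = '(' then ')' else '('))) := by
  rw [solB, dif_neg h0]
  split
  · next heq => rw [h] at heq; cases heq
  · next r' heq => rw [h] at heq; cases heq; rfl

theorem solA_eq_solB : ∀ (N : Nat) (s : List Char), s.length ≤ N → cbGo 0 s = 0 →
    solA s = solB s := by
  intro N
  induction N with
  | zero =>
    intro s hlen _
    have : s = [] := List.length_eq_zero_iff.mp (Nat.le_zero.mp hlen)
    subst this
    simp [solA, solB]
  | succ N ih =>
    intro s hlen htot
    by_cases h0 : s = []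
    · subst h0; simp [solA, solB]
    · obtain ⟨k, hgo, hk1, hdiv, hbal⟩ := bridge s s [] false rfl h0 htot
      simp only [cbGo, Bool.false_or, List.nil_append] at hgo hdiv hbal
      have hvbal : cbGo 0 (s.drop k) = 0 := by
        have := cbGo_append (s.take k) (s.drop k)
        rw [List.take_append_drop] at this
        omega
      have hvlen : (s.drop k).length ≤ N := by
        have : 0 < s.length := List.length_pos_iff.mpr h0
        simp only [List.length_drop]; omega
      have hrec := ih (s.drop k) hvlen hvbal
      have hcr : checkRight (s.take k) = !hasNeg 0 (s.take k) := by
        rw [checkRight, crGo_spec, hbal]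
        simp
      have hdivS : divString s = some (s.take k, s.drop k) := hdiv
      rw [solA_some s _ _ h0 hdivS, solB_some s (k, hasNeg 0 (s.take k)) h0 hgo, hcr, hrec]
      by_cases hneg : hasNeg 0 (s.take k) = true
      · simp [hneg, flipGo_map]
      · simp only [Bool.not_eq_true] at hneg
        simp [hneg]

-- ===== VERDICT (by name: the statement is the Claim_ definition above) =====
theorem solution_spec : Claim_equal_solution := by
  intro w _ hpre
  unfold Spec_solution solution solution_alt
  congr 1
  apply solA_eq_solB w.toList.length _ (le_refl _)
  rw [cbGo_counts]
  unfold Pre_solution at hpre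
  omega
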